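-- pv_equiv track=rewrite | github.com/wattgod/gravel-race-automation | scripts/community_parser.py | get_criterion_data
-- ===== SOURCE A (Python) =====
-- CRITERION_SECTIONS = {
--     "logistics":     ["Course Specifications & Logistics", "Rider Quotes & Race Reports"],
--     "length":        ["Race Strategy & Pacing", "Rider Quotes & Race Reports"],
--     "technicality":  ["Terrain Details (Rider Perspective)", "Terrain Details",
--                       "Equipment & Gear Recommendations", "Equipment & Gear",
--                       "DNF Risk Factors"],
--     "elevation":     ["Terrain Details (Rider Perspective)", "Terrain Details",
--                       "Race Strategy & Pacing"],
--     "climate":       ["Weather Experienced", "DNF Risk Factors"],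
--     "altitude":      ["Terrain Details (Rider Perspective)", "Terrain Details"],
--     "adventure":     ["Terrain Details (Rider Perspective)", "Terrain Details",
--                       "DNF Risk Factors"],
--     "prestige":      ["Rider Quotes & Race Reports", "Community Feel & Atmosphere"],
--     "race_quality":  ["Rider Quotes & Race Reports", "Community Feel & Atmosphere",
--                       "Course Specifications & Logistics"],
--     "experience":    ["Rider Quotes & Race Reports", "Community Feel & Atmosphere",
--                       "Race Strategy & Pacing"],
--     "community":     ["Community Feel & Atmosphere", "Rider Quotes & Race Reports"],
--     "field_depth":   ["Rider Quotes & Race Reports", "Race Strategy & Pacing"],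
--     "value":         ["Community Feel & Atmosphere", "Course Specifications & Logistics"],
--     "expenses":      ["Equipment & Gear Recommendations", "Equipment & Gear",
--                       "Course Specifications & Logistics"],
-- }
--
-- def _truncate_at_sentence(text, max_chars):
--     """Truncate text at the last sentence boundary before max_chars.
--
--     Falls back to max_chars if no sentence boundary found in first half.
--     """
--     if len(text) <= max_chars:
--         return text
--     # Look for sentence-ending punctuation followed by space/newline
--     truncated = text[:max_chars]
--     # Find last sentence boundary (. or !) followed by space, newline, or end
--     last_period = -1
--     for i in range(len(truncated) - 1, max_chars // 2, -1):
--         if truncated[i] in ".!)" and (i + 1 >= len(truncated) or truncated[i + 1] in " \n\""):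
--             last_period = i + 1
--             break
--     if last_period > 0:
--         return truncated[:last_period]
--     return truncated + "..."
--
-- def get_criterion_data(criterion, sections):
--     """Get the community dump sections relevant to a specific criterion."""
--     relevant_section_names = CRITERION_SECTIONS.get(criterion, [])
--     parts = []
--     for name in relevant_section_names:
--         if name in sections:
--             text = sections[name]
--             # Cap each section contribution at 1500 chars, sentence-aware
--             parts.append(_truncate_at_sentence(text, 1500))
--     return "\n".join(parts) if parts else ""
-- ===== SOURCE B (Python) =====
-- CRITERION_SECTIONS = {
--     "logistics":     ["Course Specifications & Logistics", "Rider Quotes & Race Reports"],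
--     "length":        ["Race Strategy & Pacing", "Rider Quotes & Race Reports"],
--     "technicality":  ["Terrain Details (Rider Perspective)", "Terrain Details",
--                       "Equipment & Gear Recommendations", "Equipment & Gear",
--                       "DNF Risk Factors"],
--     "elevation":     ["Terrain Details (Rider Perspective)", "Terrain Details",
--                       "Race Strategy & Pacing"],
--     "climate":       ["Weather Experienced", "DNF Risk Factors"],
--     "altitude":      ["Terrain Details (Rider Perspective)", "Terrain Details"],
--     "adventure":     ["Terrain Details (Rider Perspective)", "Terrain Details",
--                       "DNF Risk Factors"],
--     "prestige":      ["Rider Quotes & Race Reports", "Community Feel & Atmosphere"],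
--     "race_quality":  ["Rider Quotes & Race Reports", "Community Feel & Atmosphere",
--                       "Course Specifications & Logistics"],
--     "experience":    ["Rider Quotes & Race Reports", "Community Feel & Atmosphere",
--                       "Race Strategy & Pacing"],
--     "community":     ["Community Feel & Atmosphere", "Rider Quotes & Race Reports"],
--     "field_depth":   ["Rider Quotes & Race Reports", "Race Strategy & Pacing"],
--     "value":         ["Community Feel & Atmosphere", "Course Specifications & Logistics"],
--     "expenses":      ["Equipment & Gear Recommendations", "Equipment & Gear",
--                       "Course Specifications & Logistics"],
-- }
--
--
-- def _truncate_at_sentence(text, max_chars):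
--     """Sentence-aware truncation: single forward pass keeping the last boundary."""
--     if len(text) <= max_chars:
--         return text
--     t = text[:max_chars]
--     lo = max_chars // 2
--     cut = -1
--     for i, ch in enumerate(t):
--         if i > lo and ch in ".!)" and (i + 1 == len(t) or t[i + 1] in ' \n"'):
--             cut = i + 1
--     return t[:cut] if cut > 0 else t + "..."
--
--
-- def get_criterion_data(criterion, sections):
--     """Get the community dump sections relevant to a specific criterion."""
--     return "\n".join(
--         _truncate_at_sentence(sections[name], 1500)
--         for name in CRITERION_SECTIONS.get(criterion, [])
--         if name in sections
--     )
-- ===== Notes on version B (the rewrite author's own statement) =====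
-- stated objective: idiomatic
-- what changed: The outer loop-with-accumulator becomes a single join over a comprehension, and the truncation helper's backward scan with break over range(len-1, max//2, -1) becomes one forward enumerate pass that keeps the last qualifying sentence boundary.
import Mathlib
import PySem

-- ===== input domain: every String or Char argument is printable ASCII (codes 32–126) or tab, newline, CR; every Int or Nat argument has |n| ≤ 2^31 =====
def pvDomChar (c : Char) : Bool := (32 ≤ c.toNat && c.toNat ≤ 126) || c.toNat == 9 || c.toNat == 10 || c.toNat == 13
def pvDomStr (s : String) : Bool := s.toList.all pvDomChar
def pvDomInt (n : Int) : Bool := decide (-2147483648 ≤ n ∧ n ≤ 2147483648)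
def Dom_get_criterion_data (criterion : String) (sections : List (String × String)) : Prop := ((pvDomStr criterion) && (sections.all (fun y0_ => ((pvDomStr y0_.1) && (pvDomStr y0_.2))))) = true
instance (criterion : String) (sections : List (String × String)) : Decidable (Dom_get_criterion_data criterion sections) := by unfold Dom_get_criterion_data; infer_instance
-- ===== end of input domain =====

-- B replaces A's explicit accumulator loop by a join over a comprehension and the
-- backward break-on-first-boundary scan by a single forward pass keeping the last boundary
-- (objective: idiomatic; same asymptotic cost).

-- ===== PORT A =====

-- module-level CRITERION_SECTIONS (shared data table, used by both ports)
def pvCriterionSections : PySem.Dict String (List String) := PySem.Dict.ofList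
  [ ("logistics",    ["Course Specifications & Logistics", "Rider Quotes & Race Reports"]),
    ("length",       ["Race Strategy & Pacing", "Rider Quotes & Race Reports"]),
    ("technicality", ["Terrain Details (Rider Perspective)", "Terrain Details",
                      "Equipment & Gear Recommendations", "Equipment & Gear",
                      "DNF Risk Factors"]),
    ("elevation",    ["Terrain Details (Rider Perspective)", "Terrain Details",
                      "Race Strategy & Pacing"]),
    ("climate",      ["Weather Experienced", "DNF Risk Factors"]),
    ("altitude",     ["Terrain Details (Rider Perspective)", "Terrain Details"]),
    ("adventure",    ["Terrain Details (Rider Perspective)", "Terrain Details",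
                      "DNF Risk Factors"]),
    ("prestige",     ["Rider Quotes & Race Reports", "Community Feel & Atmosphere"]),
    ("race_quality", ["Rider Quotes & Race Reports", "Community Feel & Atmosphere",
                      "Course Specifications & Logistics"]),
    ("experience",   ["Rider Quotes & Race Reports", "Community Feel & Atmosphere",
                      "Race Strategy & Pacing"]),
    ("community",    ["Community Feel & Atmosphere", "Rider Quotes & Race Reports"]),
    ("field_depth",  ["Rider Quotes & Race Reports", "Race Strategy & Pacing"]),
    ("value",        ["Community Feel & Atmosphere", "Course Specifications & Logistics"]),
    ("expenses",     ["Equipment & Gear Recommendations", "Equipment & Gear",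
                      "Course Specifications & Logistics"]) ]

-- A's loop body condition: `truncated[i] in ".!)" and (i + 1 >= len(truncated) or truncated[i+1] in " \n\"")`
-- (List.contains is exact for single-character membership in a string)
def pvCondA (t : List Char) (i : Int) : Bool :=
  (match PySem.List.pyGet? t i with
   | some c => ".!)".toList.contains c
   | none => false) &&
  (decide ((t.length : Int) ≤ i + 1) ||
   (match PySem.List.pyGet? t (i + 1) with
    | some c => " \n\"".toList.contains c
    | none => false))

-- A's `for i in range(...): if …: last_period = i + 1; break`
def pvTruncLoopA (t : List Char) : List Int → Int
  | [] => -1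
  | i :: rest => if pvCondA t i then i + 1 else pvTruncLoopA t rest

def pvTruncateA (text : List Char) (maxChars : Int) : List Char :=
  if (text.length : Int) ≤ maxChars then text
  else
    let truncated := PySem.List.slice text none (some maxChars)
    let lastPeriod := pvTruncLoopA truncated
      (PySem.List.pyRange ((truncated.length : Int) - 1) (PySem.Int.floordiv maxChars 2) (-1))
    if 0 < lastPeriod then PySem.List.slice truncated none (some lastPeriod)
    else truncated ++ "...".toList

def get_criterion_data (criterion : String) (sections : List (String × String)) : String :=
  let relevant := PySem.Dict.getD pvCriterionSections criterion []
  let parts := relevant.foldl (fun acc name =>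
    match sections.lookup name with         -- `if name in sections: text = sections[name]` (first match, dict convention)
    | some text => acc ++ [String.ofList (pvTruncateA text.toList 1500)]
    | none => acc) ([] : List String)
  if parts ≠ [] then PySem.Str.join "\n" parts else ""

-- ===== PORT B =====

-- Source B's loop condition: `i > lo and ch in ".!)" and (i + 1 == len(t) or t[i + 1] in ' \n"')`
def pvCondB (t : List Char) (lo : Int) (i : Int) (ch : Char) : Bool :=
  decide (lo < i) && ".!)".toList.contains ch &&
  (decide (i + 1 = (t.length : Int)) ||
   (match PySem.List.pyGet? t (i + 1) with
    | some c => " \n\"".toList.contains c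
    | none => false))

def pvTruncateB (text : List Char) (maxChars : Int) : List Char :=
  if (text.length : Int) ≤ maxChars then text
  else
    let t := PySem.List.slice text none (some maxChars)
    let lo := PySem.Int.floordiv maxChars 2
    let cut := (PySem.List.enumerate t).foldl
      (fun cut p => if pvCondB t lo p.1 p.2 then p.1 + 1 else cut) (-1)
    if 0 < cut then PySem.List.slice t none (some cut) else t ++ "...".toList

def get_criterion_data_alt (criterion : String) (sections : List (String × String)) : String :=
  PySem.Str.join "\n"
    (((PySem.Dict.getD pvCriterionSections criterion []).filter
        (fun name => (sections.lookup name).isSome)).map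
      (fun name => String.ofList (pvTruncateB ((sections.lookup name).getD "").toList 1500)))

-- ===== PRECONDITION & SPEC =====
def Spec_get_criterion_data (criterion : String) (sections : List (String × String)) (out : String) : Prop := out = get_criterion_data_alt criterion sections
instance (criterion : String) (sections : List (String × String)) (out : String) : Decidable (Spec_get_criterion_data criterion sections out) := by unfold Spec_get_criterion_data; infer_instance

-- ===== CLAIM (what is proved, stated in full; the proofs are below) =====
def Claim_equal_get_criterion_data : Prop := ∀ (criterion : String) (sections : List (String × String)), Dom_get_criterion_data criterion sections → Spec_get_criterion_data criterion sections (get_criterion_data criterion sections)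

-- ===== LEMMAS AND PROOFS =====

-- A's accumulator loop over the section names is the filtered map
lemma pv_outer_foldl (sections : List (String × String)) (l : List String) (acc : List String) :
    l.foldl (fun acc name =>
      match sections.lookup name with
      | some text => acc ++ [String.ofList (pvTruncateA text.toList 1500)]
      | none => acc) acc
    = acc ++ (l.filter (fun n => (sections.lookup n).isSome)).map
        (fun n => String.ofList (pvTruncateA ((sections.lookup n).getD "").toList 1500)) := by
  induction l generalizing acc with
  | nil => simp
  | cons n l ih =>
    cases h : sections.lookup n with
    | none => simp [List.foldl_cons, h, ih]
    | some text => simp [List.foldl_cons, h, ih]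

-- A's backward break-on-first-match scan equals the forward keep-last fold on the ascending range
lemma pv_desc_loop (t : List Char) (b : Int) :
    ∀ (n : Nat) (a : Int), a = b + n →
    pvTruncLoopA t (PySem.List.pyRange a b (-1)) =
    (PySem.List.pyRange (b + 1) (a + 1)).foldl
      (fun acc i => if pvCondA t i then i + 1 else acc) (-1) := by
  intro n
  induction n with
  | zero =>
    intro a ha
    rw [PySem.List.pyRange_neg_one_eq_nil (by omega), PySem.List.pyRange_one_eq_nil (by omega)]
    rfl
  | succ n ih =>
    intro a ha
    rw [PySem.List.pyRange_neg_one_cons (by omega)]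
    rw [show a + 1 = (a : Int) + 1 from rfl, PySem.List.pyRange_one_succ_right (by omega)]
    rw [List.foldl_append]
    have := ih (a - 1) (by omega)
    rw [show a - 1 + 1 = (a : Int) from by omega] at this
    simp only [pvTruncLoopA, ← this, List.foldl_cons, List.foldl_nil]

lemma pv_trunc_eq (text : List Char) : pvTruncateA text 1500 = pvTruncateB text 1500 := by
  unfold pvTruncateA pvTruncateB
  by_cases h : (text.length : Int) ≤ 1500
  · simp [h]
  · simp only [h, if_false]
    have ht : (PySem.List.slice text none (some 1500)) = text.take 1500 := by
      have := PySem.List.slice_to text (b := 1500) (by norm_num)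
      simpa using this
    set t := PySem.List.slice text none (some 1500) with hdef
    have hlen : t.length = 1500 := by
      rw [ht]; simp; omega
    have hlenI : (t.length : Int) = 1500 := by rw [hlen]; norm_num
    have hfd : PySem.Int.floordiv 1500 2 = 750 := by decide
    -- B's cut as a fold over the ascending index range
    have hcutB : (PySem.List.enumerate t).foldl
        (fun cut p => if pvCondB t (PySem.Int.floordiv 1500 2) p.1 p.2 then p.1 + 1 else cut) (-1)
        = (PySem.List.pyRange 751 1500).foldl
            (fun acc i => if pvCondA t i then i + 1 else acc) (-1) := by
      rw [PySem.List.enumerate_eq_map_pyRange t 'a', List.foldl_map]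
      have hsplit : PySem.List.pyRange 0 (PySem.List.len t) =
          PySem.List.pyRange 0 751 ++ PySem.List.pyRange 751 1500 := by
        rw [show PySem.List.len t = (1500 : Int) by simp [hlen]]
        exact PySem.List.pyRange_one_append 0 751 1500 (by omega) (by omega)
      rw [hsplit, List.foldl_append]
      have h1 : (PySem.List.pyRange 0 751).foldl
          (fun acc j => if pvCondB t (PySem.Int.floordiv 1500 2) j (PySem.List.pyGetD t j 'a') then j + 1 else acc) (-1) = (-1 : Int) := by
        rw [PySem.List.foldl_congr_mem _ _ (fun acc _ => acc) _ ?_, PySem.List.foldl_ignore]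
        intro acc j hj
        rw [PySem.List.mem_pyRange_one] at hj
        simp [pvCondB, show ¬(750 : Int) < j by omega]
      rw [h1]
      apply PySem.List.foldl_congr_mem
      intro acc j hj
      rw [PySem.List.mem_pyRange_one] at hj
      have hcond : pvCondB t (PySem.Int.floordiv 1500 2) j (PySem.List.pyGetD t j 'a') = pvCondA t j := by
        obtain ⟨k, hk⟩ : ∃ k : Nat, j = (k : Int) := ⟨j.toNat, by omega⟩
        subst hk
        have hklt : k < t.length := by omega
        have hget : PySem.List.pyGet? t (k : Int) = some t[k] := by
          simp [hklt]
        have hgetD : PySem.List.pyGetD t (k : Int) 'a' = t[k] := by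
          simp [PySem.List.pyGetD, hget]
        simp only [pvCondB, pvCondA, hfd, hget, hgetD, hlenI]
        have h750 : decide ((750 : Int) < (k : Int)) = true := by simp; omega
        have hiff : decide ((k : Int) + 1 = (1500 : Int)) = decide ((1500 : Int) ≤ (k : Int) + 1) := by
          simp only [decide_eq_decide]; omega
        rw [h750, hiff]
        simp
      rw [hcond]
    rw [hcutB]
    -- A's cut via the descending-scan lemma
    have hcutA := pv_desc_loop t 750 749 1499 (by omega)
    norm_num at hcutA
    rw [hfd, show ((t.length : Int) - 1) = (1499 : Int) by rw [hlen]; norm_num, hcutA]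

lemma pv_join_if (L : List String) :
    (if L ≠ [] then PySem.Str.join "\n" L else "") = PySem.Str.join "\n" L := by
  by_cases h : L = []
  · subst h; rfl
  · simp [h]

-- ===== VERDICT (by name: the statement is the Claim_ definition above) =====
theorem get_criterion_data_spec : Claim_equal_get_criterion_data := by
  intro criterion sections _
  unfold Spec_get_criterion_data
  simp only [get_criterion_data, get_criterion_data_alt]
  rw [pv_outer_foldl]
  simp only [List.nil_append, pv_trunc_eq]
  exact pv_join_if _
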